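-- pv_equiv track=rewrite | github.com/Kitware/cumulus | cumulus/transport/newt.py | _perms_to_mode
-- ===== SOURCE A (Python) =====
-- import stat
--
-- type = {
--     'd': stat.S_IFDIR,
--     'l': stat.S_IFLNK
-- }
--
-- user = {
--     'r': stat.S_IRUSR,
--     'w': stat.S_IWUSR,
--     'x': stat.S_IXUSR
-- }
--
-- group = {
--     'r': stat.S_IRGRP,
--     'w': stat.S_IWGRP,
--     'x': stat.S_IXGRP
-- }
--
-- other = {
--     'r': stat.S_IROTH,
--     'w': stat.S_IWOTH,
--     'x': stat.S_IXOTH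
-- }
--
-- def _perms_to_mode(perms):
--     mode = 0
--     index = 0
--
--     def apply_perms(perms_to_modes, perms):
--         mode = 0
--         for p in perms:
--             if p in perms_to_modes:
--                 mode |= perms_to_modes[p]
--
--         return mode
--
--     # type
--     mode |= apply_perms(type, perms[index:1])
--     index += 1
--
--     # user
--     mode |= apply_perms(user, perms[index: index+3])
--     index += 3
--
--     # group
--     mode |= apply_perms(group, perms[index: index+3])
--     index += 3
--
--     # other
--     mode |= apply_perms(other, perms[index: index+3])
--     index += 3
--
--     return mode
-- ===== SOURCE B (Python) =====
-- def _perms_to_mode(perms):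
--     # Table-free: each bit value is computed arithmetically from the position
--     # (category scale 8**(2 - (i-1)//3)) instead of looked up in per-category dicts.
--     mode = 0
--     for i, c in enumerate(perms[:10]):
--         if i == 0:
--             if c == 'd':
--                 mode |= 0o040000
--             elif c == 'l':
--                 mode |= 0o120000
--         else:
--             v = 4 if c == 'r' else 2 if c == 'w' else 1 if c == 'x' else 0
--             mode |= v * 8 ** (2 - (i - 1) // 3)
--     return mode
-- ===== Notes on version B (the rewrite author's own statement) =====
-- stated objective: alternative
-- what changed: Removes A's four permission dicts and the slice-folding helper entirely: B computes each bit arithmetically from the character class (r/w/x -> 4/2/1, d/l for the type slot) and its position, scaling by 8**(2-(i-1)//3), in one table-free pass over the first ten characters.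
import Mathlib
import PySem

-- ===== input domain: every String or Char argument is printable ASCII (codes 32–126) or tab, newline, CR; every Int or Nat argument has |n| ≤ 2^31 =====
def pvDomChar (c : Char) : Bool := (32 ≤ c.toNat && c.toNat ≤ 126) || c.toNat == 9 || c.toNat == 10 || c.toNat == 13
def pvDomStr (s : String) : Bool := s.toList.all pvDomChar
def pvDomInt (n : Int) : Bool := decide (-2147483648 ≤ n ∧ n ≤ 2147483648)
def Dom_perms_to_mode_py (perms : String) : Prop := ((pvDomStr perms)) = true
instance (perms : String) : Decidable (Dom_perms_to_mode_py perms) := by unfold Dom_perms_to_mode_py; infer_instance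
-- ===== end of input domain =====

-- B drops A's four per-category dicts and slice-folding helper entirely: it derives each
-- bit arithmetically from the character and its position (scale 8^(2-(i-1)//3)) in one
-- table-free pass; objective: alternative decomposition (no speed claim).

-- ===== PORT A =====
-- the four module-level permission dicts (literal dicts with distinct keys → assoc lists)
def pvType : List (Char × Int) := [('d', 16384), ('l', 40960)]
def pvUser : List (Char × Int) := [('r', 256), ('w', 128), ('x', 64)]
def pvGroup : List (Char × Int) := [('r', 32), ('w', 16), ('x', 8)]
def pvOther : List (Char × Int) := [('r', 4), ('w', 2), ('x', 1)]

-- inner helper apply_perms: fold over the slice, or-ing in the dict value when present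
def pvApplyPerms (tbl : List (Char × Int)) (ps : List Char) : Int :=
  ps.foldl (fun mode p =>
    match tbl.lookup p with
    | some v => PySem.Int.bor mode v
    | none => mode) 0

def perms_to_mode_py (perms : String) : Int :=
  PySem.Int.bor
    (PySem.Int.bor
      (PySem.Int.bor
        (PySem.Int.bor 0 (pvApplyPerms pvType (PySem.List.slice perms.toList (some 0) (some 1))))
        (pvApplyPerms pvUser (PySem.List.slice perms.toList (some 1) (some 4))))
      (pvApplyPerms pvGroup (PySem.List.slice perms.toList (some 4) (some 7))))
    (pvApplyPerms pvOther (PySem.List.slice perms.toList (some 7) (some 10)))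

-- ===== PORT B =====
-- the loop body of Source B (i, c ↦ updated mode); Python's `v * 8 ** (2 - (i - 1) // 3)`
def pvStepB (mode : Int) (ic : Int × Char) : Int :=
  if ic.1 = 0 then
    if ic.2 = 'd' then PySem.Int.bor mode 16384
    else if ic.2 = 'l' then PySem.Int.bor mode 40960
    else mode
  else
    PySem.Int.bor mode
      ((if ic.2 = 'r' then 4 else if ic.2 = 'w' then 2 else if ic.2 = 'x' then 1 else 0)
        * 8 ^ (2 - PySem.Int.floordiv (ic.1 - 1) 3).toNat)

def perms_to_mode_py_alt (perms : String) : Int :=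
  (PySem.List.enumerate (PySem.List.slice perms.toList none (some 10)) 0).foldl pvStepB 0

-- ===== PRECONDITION & SPEC =====
def Spec_perms_to_mode_py (perms : String) (out : Int) : Prop := out = perms_to_mode_py_alt perms
instance (perms : String) (out : Int) : Decidable (Spec_perms_to_mode_py perms out) := by unfold Spec_perms_to_mode_py; infer_instance

-- ===== CLAIM (what is proved, stated in full; the proofs are below) =====
def Claim_equal_perms_to_mode_py : Prop := ∀ (perms : String), Dom_perms_to_mode_py perms → Spec_perms_to_mode_py perms (perms_to_mode_py perms)

-- ===== LEMMAS AND PROOFS =====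

-- the contribution of one character looked up in one table (0 when absent)
def pvContrib (tbl : List (Char × Int)) (c : Char) : Int := (tbl.lookup c).getD 0

-- B's per-position contribution as a function of index and character
def pvG (i : Int) (c : Char) : Int :=
  if i = 0 then (if c = 'd' then 16384 else if c = 'l' then 40960 else 0)
  else (if c = 'r' then 4 else if c = 'w' then 2 else if c = 'x' then 1 else 0)
        * 8 ^ (2 - PySem.Int.floordiv (i - 1) 3).toNat

-- left fold of bor over a list, starting from 0
def pvOr (L : List Int) : Int := L.foldl PySem.Int.bor 0

def pvNN (L : List Int) : Prop := ∀ x ∈ L, 0 ≤ x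

theorem pvZeroBor (a : Int) : PySem.Int.bor 0 a = a := by
  rw [PySem.Int.bor_comm, PySem.Int.bor_zero]

theorem pvBorNonneg {a b : Int} (ha : 0 ≤ a) (hb : 0 ≤ b) : 0 ≤ PySem.Int.bor a b := by
  rw [PySem.Int.bor_of_nonneg ha hb]; positivity

theorem pvBorAssoc {a b c : Int} (ha : 0 ≤ a) (hb : 0 ≤ b) (hc : 0 ≤ c) :
    PySem.Int.bor (PySem.Int.bor a b) c = PySem.Int.bor a (PySem.Int.bor b c) := by
  rw [PySem.Int.bor_of_nonneg ha hb, PySem.Int.bor_of_nonneg hb hc,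
      PySem.Int.bor_of_nonneg (by positivity) hc, PySem.Int.bor_of_nonneg ha (by positivity)]
  simp [Nat.lor_assoc]

theorem pvFoldBorNonneg (L : List Int) (m : Int) (hm : 0 ≤ m) (h : pvNN L) :
    0 ≤ L.foldl PySem.Int.bor m := by
  induction L generalizing m with
  | nil => simpa using hm
  | cons x t ih =>
      exact ih _ (pvBorNonneg hm (h x (by simp))) (fun y hy => h y (by simp [hy]))

theorem pvOrNonneg (L : List Int) (h : pvNN L) : 0 ≤ pvOr L :=
  pvFoldBorNonneg L 0 le_rfl h

theorem pvOrShift (L : List Int) (m : Int) (hm : 0 ≤ m) (h : pvNN L) :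
    L.foldl PySem.Int.bor m = PySem.Int.bor m (pvOr L) := by
  induction L generalizing m with
  | nil => simp [pvOr, PySem.Int.bor_zero]
  | cons x t ih =>
      have hx : 0 ≤ x := h x (by simp)
      have ht : pvNN t := fun y hy => h y (by simp [hy])
      have hOr : 0 ≤ pvOr t := pvOrNonneg t ht
      have hxt : pvOr (x :: t) = PySem.Int.bor x (pvOr t) := by
        show (x :: t).foldl PySem.Int.bor 0 = _
        rw [List.foldl_cons, pvZeroBor, ih x hx ht]
      rw [List.foldl_cons, ih _ (pvBorNonneg hm hx) ht, hxt]
      exact pvBorAssoc hm hx hOr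

theorem pvOrAppend (L1 L2 : List Int) (h1 : pvNN L1) (h2 : pvNN L2) :
    pvOr (L1 ++ L2) = PySem.Int.bor (pvOr L1) (pvOr L2) := by
  show (L1 ++ L2).foldl PySem.Int.bor 0 = _
  rw [List.foldl_append]
  exact pvOrShift L2 _ (pvOrNonneg L1 h1) h2

-- A's helper as an or-fold over per-character contributions
theorem pvApplyEq (tbl : List (Char × Int)) (ps : List Char) :
    pvApplyPerms tbl ps = pvOr (ps.map (pvContrib tbl)) := by
  show _ = (ps.map (pvContrib tbl)).foldl PySem.Int.bor 0
  rw [List.foldl_map]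
  unfold pvApplyPerms
  congr 1
  funext m c
  cases h : tbl.lookup c <;> simp [pvContrib, h, PySem.Int.bor_zero]

-- B's fold as an or-fold over per-position contributions
theorem pvFoldB (L : List (Int × Char)) :
    L.foldl pvStepB 0 = pvOr (L.map (fun ic => pvG ic.1 ic.2)) := by
  show _ = (L.map (fun ic => pvG ic.1 ic.2)).foldl PySem.Int.bor 0
  rw [List.foldl_map]
  congr 1
  funext m ic
  unfold pvStepB pvG
  split_ifs <;> simp [PySem.Int.bor_zero]

-- B's contribution coincides with the table lookups, position by position
theorem pvG_type (c : Char) : pvG 0 c = pvContrib pvType c := by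
  unfold pvG pvContrib pvType
  by_cases hd : c = 'd'
  · simp [hd, List.lookup]
  · by_cases hl : c = 'l'
    · simp [hl, List.lookup]
    · simp [hd, hl, List.lookup, beq_false_of_ne hd, beq_false_of_ne hl]

theorem pvG_cat (i : Int) (lo : Int) (t : List (Char × Int)) (r w x : Int)
    (hlo : lo = 1 ∨ lo = 4 ∨ lo = 7) (h1 : lo ≤ i) (h2 : i < lo + 3)
    (ht : t = [('r', r), ('w', w), ('x', x)])
    (hr : r = 4 * 8 ^ (2 - ((lo - 1) / 3)).toNat)
    (hw : w = 2 * 8 ^ (2 - ((lo - 1) / 3)).toNat)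
    (hx : x = 1 * 8 ^ (2 - ((lo - 1) / 3)).toNat)
    (c : Char) : pvG i c = pvContrib t c := by
  have hne : ¬ i = 0 := by omega
  have hfd : PySem.Int.floordiv (i - 1) 3 = (lo - 1) / 3 := by
    rw [PySem.Int.floordiv_eq_ediv_of_pos (by omega)]
    omega
  unfold pvG pvContrib
  rw [if_neg hne, hfd, ht]
  by_cases h'r : c = 'r'
  · simp [h'r, List.lookup, hr]
  · by_cases h'w : c = 'w'
    · simp [h'w, List.lookup, hw]
    · by_cases h'x : c = 'x'
      · simp [h'x, List.lookup, hx]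
      · simp [h'r, h'w, h'x, List.lookup, beq_false_of_ne h'r, beq_false_of_ne h'w, beq_false_of_ne h'x]

-- chunk lemmas: a short chunk of B's enumerate pass equals the map of one table's contributions
theorem pvChunk1 (cs : List Char) (h : cs.length ≤ 1) :
    (PySem.List.enumerate cs 0).map (fun ic => pvG ic.1 ic.2) = cs.map (pvContrib pvType) := by
  match cs, h with
  | [], _ => simp [PySem.List.enumerate_nil]
  | [a], _ =>
      simp only [PySem.List.enumerate_cons, PySem.List.enumerate_nil, List.map_cons, List.map_nil]
      rw [pvG_type]

theorem pvChunk3 (s : Int) (t : List (Char × Int))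
    (hG : ∀ i c, s ≤ i → i < s + 3 → pvG i c = pvContrib t c)
    (cs : List Char) (h : cs.length ≤ 3) :
    (PySem.List.enumerate cs s).map (fun ic => pvG ic.1 ic.2) = cs.map (pvContrib t) := by
  match cs, h with
  | [], _ => simp [PySem.List.enumerate_nil]
  | [a], _ =>
      simp only [PySem.List.enumerate_cons, PySem.List.enumerate_nil, List.map_cons, List.map_nil]
      rw [hG s a le_rfl (by omega)]
  | [a, b], _ =>
      simp only [PySem.List.enumerate_cons, PySem.List.enumerate_nil, List.map_cons, List.map_nil]
      rw [hG s a le_rfl (by omega), hG (s+1) b (by omega) (by omega)]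
  | [a, b, c], _ =>
      simp only [PySem.List.enumerate_cons, PySem.List.enumerate_nil, List.map_cons, List.map_nil]
      rw [hG s a le_rfl (by omega), hG (s+1) b (by omega) (by omega),
          hG (s+1+1) c (by omega) (by omega)]

theorem pvMapNN (tbl : List (Char × Int)) (htbl : ∀ x ∈ tbl, (0:Int) ≤ x.2)
    (s : List Char) : pvNN (s.map (pvContrib tbl)) := by
  intro x hx
  obtain ⟨c, -, rfl⟩ := List.mem_map.mp hx
  unfold pvContrib
  cases h : tbl.lookup c with
  | none => simp
  | some v =>
      have : ∃ kk, (kk, v) ∈ tbl := by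
        clear hx
        induction tbl with
        | nil => simp [List.lookup] at h
        | cons p t ih =>
            rw [List.lookup_cons] at h
            rcases hc : (c == p.1) with _ | _
            · simp [hc] at h
              obtain ⟨kk, hk⟩ := ih (fun x hx => htbl x (by simp [hx])) h
              exact ⟨kk, by simp [hk]⟩
            · simp [hc] at h
              exact ⟨p.1, by simp [← h]⟩
      obtain ⟨kk, hk⟩ := this
      simpa using htbl (kk, v) hk

theorem pvTypeNN : ∀ x ∈ pvType, (0:Int) ≤ x.2 := by decide
theorem pvUserNN : ∀ x ∈ pvUser, (0:Int) ≤ x.2 := by decide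
theorem pvGroupNN : ∀ x ∈ pvGroup, (0:Int) ≤ x.2 := by decide
theorem pvOtherNN : ∀ x ∈ pvOther, (0:Int) ≤ x.2 := by decide

-- ===== VERDICT (by name: the statement is the Claim_ definition above) =====
theorem perms_to_mode_py_spec : Claim_equal_perms_to_mode_py := by
  intro perms _
  unfold Spec_perms_to_mode_py
  set l := perms.toList with hl
  -- the four slices as take/drop chunks
  set s1 := l.take 1 with hs1
  set s2 := (l.drop 1).take 3 with hs2
  set s3 := (l.drop 4).take 3 with hs3
  set s4 := (l.drop 7).take 3 with hs4
  set M1 := s1.map (pvContrib pvType) with hM1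
  set M2 := s2.map (pvContrib pvUser) with hM2
  set M3 := s3.map (pvContrib pvGroup) with hM3
  set M4 := s4.map (pvContrib pvOther) with hM4
  have hN1 : pvNN M1 := pvMapNN _ pvTypeNN _
  have hN2 : pvNN M2 := pvMapNN _ pvUserNN _
  have hN3 : pvNN M3 := pvMapNN _ pvGroupNN _
  have hN4 : pvNN M4 := pvMapNN _ pvOtherNN _
  have hO1 : 0 ≤ pvOr M1 := pvOrNonneg _ hN1
  have hO2 : 0 ≤ pvOr M2 := pvOrNonneg _ hN2
  have hO3 : 0 ≤ pvOr M3 := pvOrNonneg _ hN3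
  have hO4 : 0 ≤ pvOr M4 := pvOrNonneg _ hN4
  -- A-side: unfold into the bor of the four chunk contributions
  have hA : perms_to_mode_py perms
      = PySem.Int.bor (pvOr M1) (PySem.Int.bor (pvOr M2) (PySem.Int.bor (pvOr M3) (pvOr M4))) := by
    unfold perms_to_mode_py
    rw [PySem.List.slice_toNat perms.toList (a := 0) (b := 1) (by norm_num) (by norm_num),
        PySem.List.slice_toNat perms.toList (a := 1) (b := 4) (by norm_num) (by norm_num),
        PySem.List.slice_toNat perms.toList (a := 4) (b := 7) (by norm_num) (by norm_num),
        PySem.List.slice_toNat perms.toList (a := 7) (b := 10) (by norm_num) (by norm_num)]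
    have e0 : ((0:Int)).toNat = 0 := rfl
    have e1 : ((1:Int)).toNat = 1 := rfl
    have e4 : ((4:Int)).toNat = 4 := rfl
    have e7 : ((7:Int)).toNat = 7 := rfl
    have e10 : ((10:Int)).toNat = 10 := rfl
    rw [e0, e1, e4, e7, e10]
    simp only [show (1-0:Nat) = 1 from rfl, show (4-1:Nat) = 3 from rfl, List.drop_zero]
    rw [← hl, ← hs1, ← hs2, ← hs3, ← hs4,
        pvApplyEq, pvApplyEq, pvApplyEq, pvApplyEq,
        ← hM1, ← hM2, ← hM3, ← hM4, pvZeroBor,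
        pvBorAssoc hO1 hO2 hO3,
        pvBorAssoc hO1 (pvBorNonneg hO2 hO3) hO4,
        pvBorAssoc hO2 hO3 hO4]
  -- B-side: split the single arithmetic pass into the same four chunks
  have hB : perms_to_mode_py_alt perms
      = PySem.Int.bor (pvOr M1) (PySem.Int.bor (pvOr M2) (PySem.Int.bor (pvOr M3) (pvOr M4))) := by
    unfold perms_to_mode_py_alt
    rw [PySem.List.slice_to perms.toList (b := 10) (by norm_num)]
    have e10 : ((10:Int)).toNat = 10 := rfl
    rw [e10, pvFoldB, ← hl]
    have hsplit : l.take 10 = s1 ++ (s2 ++ (s3 ++ s4)) := by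
      rw [hs1, hs2, hs3, hs4]
      rw [show (10:Nat) = 1 + 9 by norm_num, List.take_add,
          show (9:Nat) = 3 + 6 by norm_num, List.take_add, List.drop_drop,
          show (6:Nat) = 3 + 3 by norm_num, List.take_add, List.drop_drop]
    rw [hsplit, PySem.List.enumerate_append, PySem.List.enumerate_append,
        PySem.List.enumerate_append, List.map_append, List.map_append, List.map_append]
    have hGu : ∀ i c, (1:Int) ≤ i → i < 1 + 3 → pvG i c = pvContrib pvUser c := by
      intro i c h1 h2
      exact pvG_cat i 1 pvUser 256 128 64 (by norm_num) h1 h2 rfl (by decide) (by decide) (by decide) c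
    have hGg : ∀ i c, (4:Int) ≤ i → i < 4 + 3 → pvG i c = pvContrib pvGroup c := by
      intro i c h1 h2
      exact pvG_cat i 4 pvGroup 32 16 8 (by norm_num) h1 h2 rfl (by decide) (by decide) (by decide) c
    have hGo : ∀ i c, (7:Int) ≤ i → i < 7 + 3 → pvG i c = pvContrib pvOther c := by
      intro i c h1 h2
      exact pvG_cat i 7 pvOther 4 2 1 (by norm_num) h1 h2 rfl (by decide) (by decide) (by decide) c
    have hc1 : (PySem.List.enumerate s1 0).map (fun ic => pvG ic.1 ic.2) = M1 :=
      pvChunk1 s1 (by rw [hs1, List.length_take]; omega)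
    by_cases hnil : l = []
    · -- everything is empty
      have h1 : s1 = [] := by simp [hs1, hnil]
      have h2 : s2 = [] := by simp [hs2, hnil]
      have h3 : s3 = [] := by simp [hs3, hnil]
      have h4 : s4 = [] := by simp [hs4, hnil]
      simp only [h1, h2, h3, h4, PySem.List.enumerate_nil, List.map_nil, List.append_nil,
        hM1, hM2, hM3, hM4]
      decide
    · have hl1 : s1.length = 1 := by
        rw [hs1, List.length_take]
        have : l.length ≠ 0 := fun h => hnil (List.eq_nil_of_length_eq_zero h)
        omega
      have ho2 : (0 : Int) + (s1.length : Int) = 1 := by rw [hl1]; norm_num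
      rw [ho2]
      have hc2 : (PySem.List.enumerate s2 1).map (fun ic => pvG ic.1 ic.2) = M2 :=
        pvChunk3 1 pvUser (by intro i c h1 h2; exact hGu i c h1 (by omega))
          s2 (by rw [hs2, List.length_take]; omega)
      by_cases hl2 : s2.length = 3
      · have ho3 : (1 : Int) + (s2.length : Int) = 4 := by rw [hl2]; norm_num
        rw [ho3]
        have hc3 : (PySem.List.enumerate s3 4).map (fun ic => pvG ic.1 ic.2) = M3 :=
          pvChunk3 4 pvGroup (by intro i c h1 h2; exact hGg i c h1 (by omega))
            s3 (by rw [hs3, List.length_take]; omega)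
        by_cases hl3 : s3.length = 3
        · have ho4 : (4 : Int) + (s3.length : Int) = 7 := by rw [hl3]; norm_num
          rw [ho4]
          have hc4 : (PySem.List.enumerate s4 7).map (fun ic => pvG ic.1 ic.2) = M4 :=
            pvChunk3 7 pvOther (by intro i c h1 h2; exact hGo i c h1 (by omega))
              s4 (by rw [hs4, List.length_take]; omega)
          rw [hc1, hc2, hc3, hc4]
          rw [pvOrAppend M1 _ hN1 (by
                intro x hx
                rcases List.mem_append.mp hx with h | h
                · exact hN2 x h
                · rcases List.mem_append.mp h with h | h
                  · exact hN3 x h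
                  · exact hN4 x h),
              pvOrAppend M2 _ hN2 (by
                intro x hx
                rcases List.mem_append.mp hx with h | h
                · exact hN3 x h
                · exact hN4 x h),
              pvOrAppend M3 M4 hN3 hN4]
        · -- s3 short → s4 = []
          have h4 : s4 = [] := by
            rw [hs3, List.length_take, List.length_drop] at hl3
            have h7 : l.drop 7 = [] := List.drop_eq_nil_of_le (by omega)
            simp [hs4, h7]
          rw [h4]
          have hM4e : M4 = [] := by simp [hM4, h4]
          rw [hc1, hc2, hc3]
          simp only [PySem.List.enumerate_nil, List.map_nil]
          rw [List.append_nil]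
          have : pvOr M4 = 0 := by rw [hM4e]; rfl
          rw [this, PySem.Int.bor_zero]
          rw [pvOrAppend M1 _ hN1 (by
                intro x hx
                rcases List.mem_append.mp hx with h | h
                · exact hN2 x h
                · exact hN3 x h),
              pvOrAppend M2 M3 hN2 hN3]
      · -- s2 short → s3 = s4 = []
        have h3 : s3 = [] := by
          rw [hs2, List.length_take, List.length_drop] at hl2
          have h4 : l.drop 4 = [] := List.drop_eq_nil_of_le (by omega)
          simp [hs3, h4]
        have h4 : s4 = [] := by
          rw [hs2, List.length_take, List.length_drop] at hl2
          have h7 : l.drop 7 = [] := List.drop_eq_nil_of_le (by omega)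
          simp [hs4, h7]
        rw [h3, h4]
        have hM3e : M3 = [] := by simp [hM3, h3]
        have hM4e : M4 = [] := by simp [hM4, h4]
        rw [hc1, hc2]
        simp only [PySem.List.enumerate_nil, List.map_nil]
        rw [List.append_nil, List.append_nil]
        have e3 : pvOr M3 = 0 := by rw [hM3e]; rfl
        have e4 : pvOr M4 = 0 := by rw [hM4e]; rfl
        rw [e3, e4, PySem.Int.bor_zero, PySem.Int.bor_zero]
        exact pvOrAppend M1 M2 hN1 hN2
  rw [hA, hB]
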